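-- pv_equiv track=rewrite | github.com/jerzypodwojski/Shannon-Fano-compression | main.py | translate_file
-- ===== SOURCE A (Python) =====
-- def translate_file(alphabet, alphabet_values, data):
--     code_dict = {v: k for k, v in zip(alphabet, alphabet_values)}
--
--     current_code = ""
--     decoded_output = ""
--
--     for bit in data:
--         current_code += bit
--         if current_code in code_dict:
--             decoded_output += code_dict[current_code]
--             current_code = ""
--
--     return decoded_output
-- ===== SOURCE B (Python) =====
-- def translate_file(alphabet, alphabet_values, data):
--     code_dict = dict(zip(alphabet_values, alphabet))
--     lengths = sorted({len(c) for c in code_dict if c})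
--     out = []
--     i = 0
--     n = len(data)
--     while i < n:
--         for l in lengths:
--             if i + l > n:
--                 i = n
--                 break
--             sym = code_dict.get(data[i:i + l])
--             if sym is not None:
--                 out.append(sym)
--                 i += l
--                 break
--         else:
--             i = n
--     return "".join(out)
-- ===== Notes on version B (the rewrite author's own statement) =====
-- stated objective: alternative
-- what changed: Instead of accumulating a growing current_code string per bit and testing it against the dict, B precomputes the sorted set of (nonempty) code lengths and decodes by position: at each offset it tries the candidate lengths in increasing order with a sliced dict lookup, emitting the symbol of the shortest matching code and jumping ahead, and consuming the rest of the stream when no length can match.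
import Mathlib
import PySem

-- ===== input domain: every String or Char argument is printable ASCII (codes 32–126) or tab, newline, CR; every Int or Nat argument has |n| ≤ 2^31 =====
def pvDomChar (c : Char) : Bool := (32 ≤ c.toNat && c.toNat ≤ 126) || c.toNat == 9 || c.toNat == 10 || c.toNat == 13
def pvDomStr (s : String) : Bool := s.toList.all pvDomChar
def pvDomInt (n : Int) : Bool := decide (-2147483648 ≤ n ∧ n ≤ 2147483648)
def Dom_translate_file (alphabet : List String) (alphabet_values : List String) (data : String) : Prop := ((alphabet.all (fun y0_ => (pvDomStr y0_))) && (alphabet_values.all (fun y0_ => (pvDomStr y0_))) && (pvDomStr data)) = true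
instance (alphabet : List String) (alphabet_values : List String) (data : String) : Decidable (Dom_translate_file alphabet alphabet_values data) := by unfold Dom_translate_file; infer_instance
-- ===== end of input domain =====

-- B decodes by position with a sorted table of code lengths (shortest-match sliced lookups)
-- instead of A's per-bit growing current_code string; objective: alternative.


-- ===== PORT A =====
-- code_dict = {v: k for k, v in zip(alphabet, alphabet_values)}
def pvDictA (alphabet alphabet_values : List String) : PySem.Dict String String :=
  (alphabet.zip alphabet_values).foldl (fun d kv => d.insert kv.2 kv.1) PySem.Dict.empty

-- the for-loop over data's characters; state = (current_code, decoded_output) as char lists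
def pvALoop (d : PySem.Dict String String) : List Char → List Char → List Char → List Char
  | [], _, out => out
  | c :: rest, cur, out =>
    let cur' := cur ++ [c]
    match d.get? (String.ofList cur') with
    | some v => pvALoop d rest [] (out ++ v.toList)
    | none => pvALoop d rest cur' out

def translate_file (alphabet : List String) (alphabet_values : List String) (data : String) : String :=
  String.ofList (pvALoop (pvDictA alphabet alphabet_values) data.toList [] [])

-- ===== PORT B =====
-- code_dict = dict(zip(alphabet_values, alphabet))
def pvDictB (alphabet alphabet_values : List String) : PySem.Dict String String :=
  (alphabet_values.zip alphabet).foldl (fun d kv => d.insert kv.1 kv.2) PySem.Dict.empty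

-- lengths = sorted({len(c) for c in code_dict if c})
def pvLengths (d : PySem.Dict String String) : List Nat :=
  PySem.List.sorted
    (PySem.Set.ofList ((d.keys.filter (fun s => decide (s ≠ ""))).map (fun s => s.toList.length)))
    (fun x => x) false

-- the inner for-loop over the candidate lengths: first length whose slice is a key
-- (none also covers the 'i + l > n: consume rest' early exit, since lengths are ascending)
def pvBTry (d : PySem.Dict String String) (r : List Char) : List Nat → Option (Nat × String)
  | [] => none
  | l :: ls =>
    if r.length < l then none
    else
      match d.get? (String.ofList (r.take l)) with
      | some v => some (l, v)
      | none => pvBTry d r ls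

-- the while-loop over positions; the remaining suffix r stands for position i, fuel = initial n
def pvBLoop (d : PySem.Dict String String) (lengths : List Nat) :
    Nat → List Char → List Char → List Char
  | 0, _, out => out
  | _ + 1, [], out => out
  | fuel + 1, c :: rest, out =>
    match pvBTry d (c :: rest) lengths with
    | some (l, v) => pvBLoop d lengths fuel ((c :: rest).drop l) (out ++ v.toList)
    | none => out

def translate_file_alt (alphabet : List String) (alphabet_values : List String) (data : String) : String :=
  let d := pvDictB alphabet alphabet_values
  String.ofList (pvBLoop d (pvLengths d) data.toList.length data.toList [])

-- ===== PRECONDITION & SPEC =====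
def Spec_translate_file (alphabet : List String) (alphabet_values : List String) (data : String) (out : String) : Prop := out = translate_file_alt alphabet alphabet_values data
instance (alphabet : List String) (alphabet_values : List String) (data : String) (out : String) : Decidable (Spec_translate_file alphabet alphabet_values data out) := by unfold Spec_translate_file; infer_instance

-- ===== CLAIM (what is proved, stated in full; the proofs are below) =====
def Claim_equal_translate_file : Prop := ∀ (alphabet : List String) (alphabet_values : List String) (data : String), Dom_translate_file alphabet alphabet_values data → Spec_translate_file alphabet alphabet_values data (translate_file alphabet alphabet_values data)

-- ===== LEMMAS AND PROOFS =====

-- the two dict builders produce the same dict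
theorem pvDict_eq (alphabet alphabet_values : List String) :
    pvDictA alphabet alphabet_values = pvDictB alphabet alphabet_values := by
  unfold pvDictA pvDictB
  rw [← List.zip_swap alphabet alphabet_values, List.foldl_map]
  rfl

-- "first match from state cur": the shortest nonempty extension of cur by a prefix of r that is a key
def pvFM (d : PySem.Dict String String) (cur : List Char) : List Char → Option (Nat × String)
  | [] => none
  | c :: rest =>
    match d.get? (String.ofList (cur ++ [c])) with
    | some v => some (1, v)
    | none => (pvFM d (cur ++ [c]) rest).map (fun p => (p.1 + 1, p.2))

-- A's loop, decomposed into rounds: from a reset point it consumes exactly the first match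
theorem pvALoop_round (d : PySem.Dict String String) (r : List Char) :
    ∀ cur out, pvALoop d r cur out =
      match pvFM d cur r with
      | some (l, v) => pvALoop d (r.drop l) [] (out ++ v.toList)
      | none => out := by
  induction r with
  | nil => intro cur out; simp [pvALoop, pvFM]
  | cons c rest ih =>
    intro cur out
    simp only [pvALoop, pvFM]
    cases h : d.get? (String.ofList (cur ++ [c])) with
    | some v => simp
    | none =>
      rw [ih]
      cases hf : pvFM d (cur ++ [c]) rest with
      | some p => obtain ⟨l, v⟩ := p; simp [List.drop_succ_cons]
      | none => simp

theorem pvFM_some (d : PySem.Dict String String) (r : List Char) :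
    ∀ cur l v, pvFM d cur r = some (l, v) →
      1 ≤ l ∧ l ≤ r.length ∧ d.get? (String.ofList (cur ++ r.take l)) = some v ∧
        ∀ l', 1 ≤ l' → l' < l → d.get? (String.ofList (cur ++ r.take l')) = none := by
  induction r with
  | nil => intro cur l v h; simp [pvFM] at h
  | cons c rest ih =>
    intro cur l v h
    simp only [pvFM] at h
    cases hg : d.get? (String.ofList (cur ++ [c])) with
    | some w =>
      simp only [hg] at h
      obtain ⟨rfl, rfl⟩ := Prod.mk.inj (Option.some.inj h)
      refine ⟨le_rfl, by simp, ?_, ?_⟩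
      · have e : cur ++ (c :: rest).take 1 = cur ++ [c] := by simp
        rw [e]; exact hg
      · intro l' h1 h2; exact absurd h2 (by omega)
    | none =>
      simp only [hg, Option.map_eq_some_iff] at h
      obtain ⟨⟨l0, w⟩, hfm, heq⟩ := h
      obtain ⟨rfl, rfl⟩ := Prod.mk.inj heq
      obtain ⟨h1, h2, h3, h4⟩ := ih (cur ++ [c]) l0 w hfm
      refine ⟨by omega, by simp; omega, ?_, ?_⟩
      · have e : cur ++ (c :: rest).take (l0 + 1) = (cur ++ [c]) ++ rest.take l0 := by simp
        rw [e]; exact h3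
      · intro l' hl1 hl2
        cases l' with
        | zero => exact absurd hl1 (by omega)
        | succ m =>
          have e : cur ++ (c :: rest).take (m + 1) = (cur ++ [c]) ++ rest.take m := by simp
          rw [e]
          cases m with
          | zero => simpa using hg
          | succ k => exact h4 (k + 1) (by omega) (by omega)

theorem pvFM_none (d : PySem.Dict String String) (r : List Char) :
    ∀ cur, pvFM d cur r = none →
      ∀ l', 1 ≤ l' → l' ≤ r.length → d.get? (String.ofList (cur ++ r.take l')) = none := by
  induction r with
  | nil => intro cur _ l' h1 h2; simp at h2; omega
  | cons c rest ih =>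
    intro cur h l' h1 h2
    simp only [pvFM] at h
    cases hg : d.get? (String.ofList (cur ++ [c])) with
    | some w => rw [hg] at h; simp at h
    | none =>
      rw [hg] at h
      simp only [Option.map_eq_none_iff] at h
      cases l' with
      | zero => exact absurd h1 (by omega)
      | succ m =>
        have e : cur ++ (c :: rest).take (m + 1) = (cur ++ [c]) ++ rest.take m := by simp
        rw [e]
        cases m with
        | zero => simpa using hg
        | succ k => exact ih (cur ++ [c]) h (k + 1) (by omega) (by simp at h2; omega)

theorem pvBTry_eq_some (d : PySem.Dict String String) (r : List Char) (l : Nat) (v : String) :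
    ∀ ls : List Nat, ls.Pairwise (· < ·) → (∀ x ∈ ls, 1 ≤ x) →
      (∀ l', 1 ≤ l' → l' ≤ r.length → d.get? (String.ofList (r.take l')) ≠ none → l' ∈ ls) →
      1 ≤ l → l ≤ r.length → d.get? (String.ofList (r.take l)) = some v →
      (∀ l', 1 ≤ l' → l' < l → d.get? (String.ofList (r.take l')) = none) →
      pvBTry d r ls = some (l, v) := by
  intro ls
  induction ls with
  | nil =>
    intro _ _ hprev h1 h2 h3 _
    exact absurd (hprev l h1 h2 (by rw [h3]; simp)) (by simp)
  | cons l0 tl ih =>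
    intro hchain hpos hprev h1 h2 h3 h4
    obtain ⟨hhd, htl⟩ := List.pairwise_cons.mp hchain
    have hmem : l ∈ l0 :: tl := hprev l h1 h2 (by rw [h3]; simp)
    rcases Nat.lt_trichotomy l0 l with hlt | heq | hgt
    · -- l0 < l: the head length fails, recurse into the tail
      have hp0 : 1 ≤ l0 := hpos l0 (by simp)
      have hn : d.get? (String.ofList (r.take l0)) = none := h4 l0 hp0 hlt
      simp only [pvBTry, if_neg (by omega : ¬ r.length < l0), hn]
      apply ih htl (fun x hx => hpos x (by simp [hx])) _ h1 h2 h3 h4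
      intro l' hl1 hl2 hne
      rcases List.mem_cons.mp (hprev l' hl1 hl2 hne) with rfl | hmem'
      · exact absurd hn hne
      · exact hmem'
    · subst heq
      simp only [pvBTry, if_neg (by omega : ¬ r.length < l0), h3]
    · -- l < l0 is impossible: l is in the ascending list l0 :: tl
      exfalso
      rcases List.mem_cons.mp hmem with rfl | hmem'
      · omega
      · exact absurd (hhd l hmem') (by omega)

theorem pvBTry_eq_none (d : PySem.Dict String String) (r : List Char) :
    ∀ ls : List Nat, (∀ x ∈ ls, 1 ≤ x) →
      (∀ l', 1 ≤ l' → l' ≤ r.length → d.get? (String.ofList (r.take l')) = none) →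
      pvBTry d r ls = none := by
  intro ls
  induction ls with
  | nil => intro _ _; rfl
  | cons l0 tl ih =>
    intro hpos hnone
    by_cases hb : r.length < l0
    · simp [pvBTry, hb]
    · have hn : d.get? (String.ofList (r.take l0)) = none :=
        hnone l0 (hpos l0 (by simp)) (by omega)
      simp only [pvBTry, if_neg hb, hn]
      exact ih (fun x hx => hpos x (by simp [hx])) hnone

-- properties of the computed length table
theorem pvLengths_pairwise (d : PySem.Dict String String) :
    (pvLengths d).Pairwise (· < ·) :=
  PySem.List.sorted_ofList_pairwise_lt _

theorem pvLengths_pos (d : PySem.Dict String String) :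
    ∀ x ∈ pvLengths d, 1 ≤ x := by
  intro x hx
  unfold pvLengths at hx
  rw [PySem.List.mem_sorted, PySem.Set.mem_ofList, List.mem_map] at hx
  obtain ⟨s, hs, rfl⟩ := hx
  have hne : s ≠ "" := by simpa using (List.mem_filter.mp hs).2
  have hnil : s.toList ≠ [] := fun h => hne (String.toList_eq_nil_iff.mp h)
  cases h : s.toList with
  | nil => exact absurd h hnil
  | cons a t => simp

theorem pvLengths_cov (d : PySem.Dict String String) (s : String) (v : String)
    (h : d.get? s = some v) (hne : s ≠ "") : s.toList.length ∈ pvLengths d := by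
  have hk : s ∈ d.keys := by
    by_contra hnk
    rw [← PySem.Dict.get?_eq_none_iff_not_mem_keys (d := d)] at hnk
    simp [hnk] at h
  unfold pvLengths
  rw [PySem.List.mem_sorted, PySem.Set.mem_ofList, List.mem_map]
  exact ⟨s, List.mem_filter.mpr ⟨hk, by simpa using hne⟩, rfl⟩

-- the inner loop finds exactly the first match
theorem pvBTry_eq_pvFM (d : PySem.Dict String String) (r : List Char) :
    pvBTry d r (pvLengths d) = pvFM d [] r := by
  have hprev : ∀ l', 1 ≤ l' → l' ≤ r.length →
      d.get? (String.ofList (r.take l')) ≠ none → l' ∈ pvLengths d := by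
    intro l' h1 h2 hne
    cases hw : d.get? (String.ofList (r.take l')) with
    | none => exact absurd hw hne
    | some w =>
      have hlen : (String.ofList (r.take l')).toList.length = l' := by
        rw [String.toList_ofList, List.length_take]; omega
      have hsne : String.ofList (r.take l') ≠ "" := by
        intro hcon
        rw [hcon] at hlen
        simp at hlen
        omega
      have hm := pvLengths_cov d _ w hw hsne
      rwa [hlen] at hm
  cases hf : pvFM d [] r with
  | none =>
    apply pvBTry_eq_none d r _ (pvLengths_pos d)
    intro l' h1 h2
    have := pvFM_none d r [] hf l' h1 h2
    rwa [List.nil_append] at this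
  | some p =>
    obtain ⟨l, v⟩ := p
    obtain ⟨h1, h2, h3, h4⟩ := pvFM_some d r [] l v hf
    rw [List.nil_append] at h3
    exact pvBTry_eq_some d r l v (pvLengths d) (pvLengths_pairwise d) (pvLengths_pos d)
      hprev h1 h2 h3 (fun l' a b => by have := h4 l' a b; rwa [List.nil_append] at this)

-- the two loops agree, given enough fuel for B's while-loop
theorem pvLoop_eq (d : PySem.Dict String String) :
    ∀ fuel r out, r.length ≤ fuel →
      pvALoop d r [] out = pvBLoop d (pvLengths d) fuel r out := by
  intro fuel
  induction fuel with
  | zero =>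
    intro r out h
    have hr : r = [] := List.length_eq_zero_iff.mp (by omega)
    subst hr
    rfl
  | succ fuel ih =>
    intro r out h
    cases r with
    | nil => rfl
    | cons c rest =>
      rw [pvALoop_round d (c :: rest) [] out]
      simp only [pvBLoop]
      rw [pvBTry_eq_pvFM]
      cases hf : pvFM d [] (c :: rest) with
      | none => rfl
      | some p =>
        obtain ⟨l, v⟩ := p
        obtain ⟨h1, h2, _, _⟩ := pvFM_some d (c :: rest) [] l v hf
        apply ih
        simp only [List.length_drop, List.length_cons] at *
        omega

-- ===== VERDICT (by name: the statement is the Claim_ definition above) =====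
theorem translate_file_spec : Claim_equal_translate_file := by
  intro alphabet alphabet_values data _
  unfold Spec_translate_file translate_file translate_file_alt
  rw [pvDict_eq]
  exact congrArg String.ofList (pvLoop_eq _ _ _ _ le_rfl)
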